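-- pv_equiv track=rewrite | github.com/FotisPapadopoulos/Python-Beginner-Projects | YAHTZEE/yahtzee.py | calculate_upper_section
-- ===== SOURCE A (Python) =====
-- def calculate_upper_section(dice_numbers: list, category: str) -> int:
--     s = 0
--     if category == "ones":
--         for number in dice_numbers:
--             if number == 1:
--                 s += 1
--         return s
--     elif category == "twos":
--         for number in dice_numbers:
--             if number == 2:
--                 s += 2
--         return s
--     elif category == "threes":
--         for number in dice_numbers:
--             if number == 3:
--                 s += 3
--         return s
--     elif category == "fours":
--         for number in dice_numbers:
--             if number == 4:
--                 s += 4
--         return s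
--     elif category == "fives":
--         for number in dice_numbers:
--             if number == 5:
--                 s += 5
--         return s
--     elif category == "sixes":
--         for number in dice_numbers:
--             if number == 6:
--                 s += 6
--         return s
-- ===== SOURCE B (Python) =====
-- def _bisect_left(xs, t):
--     lo, hi = 0, len(xs)
--     while lo < hi:
--         mid = (lo + hi) // 2
--         if xs[mid] < t:
--             lo = mid + 1
--         else:
--             hi = mid
--     return lo
--
--
-- def calculate_upper_section(dice_numbers: list, category: str) -> int:
--     names = ["ones", "twos", "threes", "fours", "fives", "sixes"]
--     if category not in names:
--         return None
--     target = names.index(category) + 1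
--     xs = sorted(dice_numbers)
--     lo = _bisect_left(xs, target)
--     hi = _bisect_left(xs, target + 1)
--     return target * (hi - lo)
-- ===== Notes on version B (the rewrite author's own statement) =====
-- stated objective: alternative
-- what changed: Replaced the six-branch cascade of linear counting loops by: look the face value up by position in a name list, sort the dice once, and find the contiguous run of that face with two binary searches (bisect_left for target and target+1), returning target * run length; Pre_ restricts to the six valid category strings, outside which A falls through and returns None (not an int).
-- outside the precondition, e.g. on calculate_upper_section([1, 2], 'yahtzee'): A returns None, B returns None
import Mathlib
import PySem

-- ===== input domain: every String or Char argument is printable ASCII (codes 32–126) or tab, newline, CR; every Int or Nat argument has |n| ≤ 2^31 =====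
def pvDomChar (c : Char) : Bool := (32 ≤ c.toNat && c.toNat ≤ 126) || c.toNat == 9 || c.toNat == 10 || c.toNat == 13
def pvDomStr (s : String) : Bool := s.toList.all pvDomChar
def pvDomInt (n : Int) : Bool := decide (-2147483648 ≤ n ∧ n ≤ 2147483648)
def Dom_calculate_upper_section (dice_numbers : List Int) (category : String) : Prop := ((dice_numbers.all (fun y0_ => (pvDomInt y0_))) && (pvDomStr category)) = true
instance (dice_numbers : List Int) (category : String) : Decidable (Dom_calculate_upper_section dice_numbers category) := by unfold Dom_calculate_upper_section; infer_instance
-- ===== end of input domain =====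

-- B replaces A's six-branch cascade of counting loops by a name-list index lookup,
-- one sort, and two binary searches locating the run of the target face.


-- ===== PORT A =====
def calculate_upper_section (dice_numbers : List Int) (category : String) : Int :=
  if category = "ones" then
    dice_numbers.foldl (fun s number => if number = 1 then s + 1 else s) 0
  else if category = "twos" then
    dice_numbers.foldl (fun s number => if number = 2 then s + 2 else s) 0
  else if category = "threes" then
    dice_numbers.foldl (fun s number => if number = 3 then s + 3 else s) 0
  else if category = "fours" then
    dice_numbers.foldl (fun s number => if number = 4 then s + 4 else s) 0
  else if category = "fives" then
    dice_numbers.foldl (fun s number => if number = 5 then s + 5 else s) 0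
  else if category = "sixes" then
    dice_numbers.foldl (fun s number => if number = 6 then s + 6 else s) 0
  else 0  -- Python falls through returning None here; excluded by Pre_

-- ===== PORT B =====
-- Source B's hand-written _bisect_left is exactly the lo/hi loop PySem.List.bisectLeft
-- transcribes (mid = (lo+hi)//2, step on xs[mid] < t), so we cite the prelude's copy.
def calculate_upper_section_alt (dice_numbers : List Int) (category : String) : Int :=
  let names : List String := ["ones", "twos", "threes", "fours", "fives", "sixes"]
  if names.contains category then
    -- names.index(category): guarded by the membership test, so index? is some here
    let target : Int := ((PySem.List.index? names category).getD 0 : Nat) + 1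
    let xs := PySem.List.sorted dice_numbers (fun x => x)
    let lo := PySem.List.bisectLeft xs target
    let hi := PySem.List.bisectLeft xs (target + 1)
    target * ((hi : Int) - (lo : Int))
  else 0  -- Python B returns None here; excluded by Pre_

-- ===== PRECONDITION & SPEC =====
-- Pre_ excludes categories outside the six upper-section names: there A falls
-- through and returns None, which is not an Int (B returns None there too).
def Pre_calculate_upper_section (dice_numbers : List Int) (category : String) : Prop :=
  category = "ones" ∨ category = "twos" ∨ category = "threes" ∨
  category = "fours" ∨ category = "fives" ∨ category = "sixes"
instance (dice_numbers : List Int) (category : String) : Decidable (Pre_calculate_upper_section dice_numbers category) := by unfold Pre_calculate_upper_section; infer_instance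
def pvWitness_calculate_upper_section : List Int × String := ([3, 1, 3, 5, 3], "threes")

def Spec_calculate_upper_section (dice_numbers : List Int) (category : String) (out : Int) : Prop := out = calculate_upper_section_alt dice_numbers category
instance (dice_numbers : List Int) (category : String) (out : Int) : Decidable (Spec_calculate_upper_section dice_numbers category out) := by unfold Spec_calculate_upper_section; infer_instance

-- ===== CLAIM =====
def Claim_equal_calculate_upper_section : Prop := ∀ (dice_numbers : List Int) (category : String), Dom_calculate_upper_section dice_numbers category → Pre_calculate_upper_section dice_numbers category → Spec_calculate_upper_section dice_numbers category (calculate_upper_section dice_numbers category)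

-- ===== LEMMAS AND PROOFS =====
-- A's per-branch loop "if number == k: s += k" sums to k * count.
theorem foldl_face_count (k : Int) (xs : List Int) (s : Int) :
    xs.foldl (fun s number => if number = k then s + k else s) s
      = s + k * (xs.count k : Int) := by
  induction xs generalizing s with
  | nil => simp
  | cons x xs ih =>
    simp only [List.foldl_cons, ih, List.count_cons]
    by_cases h : x = k <;> simp [h] <;> push_cast <;> ring

-- On a sorted list the two bisect_left positions bracket exactly the run of t.
theorem bisect_count (ys : List Int) (t : Int) (hs : ys.Pairwise (· ≤ ·)) :
    (PySem.List.bisectLeft ys (t + 1) : Int) - (PySem.List.bisectLeft ys t : Int)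
      = (ys.count t : Int) := by
  obtain ⟨hL1, hL2, hL3⟩ := PySem.List.bisectLeft_spec ys t hs
  obtain ⟨hR1, hR2, hR3⟩ := PySem.List.bisectLeft_spec ys (t + 1) hs
  set L := PySem.List.bisectLeft ys t with hLdef
  set R := PySem.List.bisectLeft ys (t + 1) with hRdef
  have hLR : L ≤ R := by
    by_contra h
    have hRL : R < L := Nat.lt_of_not_le h
    have hRlt : R < ys.length := lt_of_lt_of_le hRL hL1
    have h1 := hL2 R hRlt hRL
    have h2 := hR3 R hRlt (le_refl _)
    omega
  have hsplit : ys = ys.take L ++ ((ys.take R).drop L ++ ys.drop R) := by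
    conv_lhs => rw [← List.take_append_drop R ys]
    rw [← List.append_assoc]
    congr 1
    conv_lhs => rw [← List.take_append_drop L (ys.take R)]
    rw [List.take_take, Nat.min_eq_left hLR]
  have hc1 : (ys.take L).count t = 0 := by
    rw [List.count_eq_zero]
    intro hmem
    obtain ⟨j, hj, hje⟩ := List.getElem_of_mem hmem
    have hjL : j < L := lt_of_lt_of_le hj (by simp [List.length_take])
    have hjlen : j < ys.length := lt_of_lt_of_le hjL hL1
    have := hL2 j hjlen hjL
    rw [List.getElem_take] at hje
    omega
  have hc3 : (ys.drop R).count t = 0 := by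
    rw [List.count_eq_zero]
    intro hmem
    obtain ⟨j, hj, hje⟩ := List.getElem_of_mem hmem
    rw [List.getElem_drop] at hje
    have hjlen : R + j < ys.length := by simp at hj; omega
    have := hR3 (R + j) hjlen (by omega)
    omega
  have hmidlen : ((ys.take R).drop L).length = R - L := by
    simp [List.length_drop, List.length_take, Nat.min_eq_left hR1]
  have hc2 : ((ys.take R).drop L).count t = R - L := by
    rw [← hmidlen]
    rw [List.count_eq_length]
    intro b hb
    obtain ⟨j, hj, hje⟩ := List.getElem_of_mem hb
    rw [List.getElem_drop, List.getElem_take] at hje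
    rw [hmidlen] at hj
    have hjlen : L + j < ys.length := by
      have := hR1; omega
    have h1 := hR2 (L + j) hjlen (by omega)
    have h2 := hL3 (L + j) hjlen (by omega)
    omega
  have : ys.count t = R - L := by
    conv_lhs => rw [hsplit]
    rw [List.count_append, List.count_append, hc1, hc2, hc3]
    omega
  omega

-- B's bracket width on the sorted copy counts t's occurrences in the original list.
theorem B_count (dice : List Int) (t : Int) :
    (PySem.List.bisectLeft (PySem.List.sorted dice (fun x => x)) (t + 1) : Int)
      - (PySem.List.bisectLeft (PySem.List.sorted dice (fun x => x)) t : Int)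
      = (dice.count t : Int) := by
  rw [← (PySem.List.sorted_perm dice (fun x : Int => x) false).count_eq]
  exact bisect_count _ t (PySem.List.sorted_pairwise dice _)

-- ===== VERDICT =====
theorem calculate_upper_section_spec : Claim_equal_calculate_upper_section := by
  intro dice category _ hpre
  unfold Spec_calculate_upper_section calculate_upper_section calculate_upper_section_alt
  rcases hpre with h | h | h | h | h | h
  · subst h
    rw [if_pos rfl]
    norm_num [foldl_face_count, show ((List.idxOf? ("ones":String) ["ones", "twos", "threes", "fours", "fives", "sixes"]).getD 0 : Nat) = 0 from by decide]
    have := B_count dice 1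
    norm_num at this ⊢
    omega
  · subst h
    rw [if_neg (by decide : ¬("twos":String) = "ones"), if_pos rfl]
    norm_num [foldl_face_count, show ((List.idxOf? ("twos":String) ["ones", "twos", "threes", "fours", "fives", "sixes"]).getD 0 : Nat) = 1 from by decide]
    have := B_count dice 2
    norm_num at this ⊢
    omega
  · subst h
    rw [if_neg (by decide : ¬("threes":String) = "ones"), if_neg (by decide : ¬("threes":String) = "twos"), if_pos rfl]
    norm_num [foldl_face_count, show ((List.idxOf? ("threes":String) ["ones", "twos", "threes", "fours", "fives", "sixes"]).getD 0 : Nat) = 2 from by decide]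
    have := B_count dice 3
    norm_num at this ⊢
    omega
  · subst h
    rw [if_neg (by decide : ¬("fours":String) = "ones"), if_neg (by decide : ¬("fours":String) = "twos"), if_neg (by decide : ¬("fours":String) = "threes"), if_pos rfl]
    norm_num [foldl_face_count, show ((List.idxOf? ("fours":String) ["ones", "twos", "threes", "fours", "fives", "sixes"]).getD 0 : Nat) = 3 from by decide]
    have := B_count dice 4
    norm_num at this ⊢
    omega
  · subst h
    rw [if_neg (by decide : ¬("fives":String) = "ones"), if_neg (by decide : ¬("fives":String) = "twos"), if_neg (by decide : ¬("fives":String) = "threes"), if_neg (by decide : ¬("fives":String) = "fours"), if_pos rfl]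
    norm_num [foldl_face_count, show ((List.idxOf? ("fives":String) ["ones", "twos", "threes", "fours", "fives", "sixes"]).getD 0 : Nat) = 4 from by decide]
    have := B_count dice 5
    norm_num at this ⊢
    omega
  · subst h
    rw [if_neg (by decide : ¬("sixes":String) = "ones"), if_neg (by decide : ¬("sixes":String) = "twos"), if_neg (by decide : ¬("sixes":String) = "threes"), if_neg (by decide : ¬("sixes":String) = "fours"), if_neg (by decide : ¬("sixes":String) = "fives"), if_pos rfl]
    norm_num [foldl_face_count, show ((List.idxOf? ("sixes":String) ["ones", "twos", "threes", "fours", "fives", "sixes"]).getD 0 : Nat) = 5 from by decide]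
    have := B_count dice 6
    norm_num at this ⊢
    omega
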